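-- pv_equiv track=rewrite | github.com/guyHollander/Erdos-Numbers-Project | scripts/parse-dblp.py | find_first_and_last
-- ===== SOURCE A (Python) =====
-- def find_first_and_last(normalized_splitted):
--     is_assigned = False
--     first = ''
--     last = ''
--     for i in range(len(normalized_splitted)):
--         if normalized_splitted[i].find('.') == -1:
--             if is_assigned == False:
--                 first = normalized_splitted[i]
--                 is_assigned = True
--             last = normalized_splitted[i]
--     return is_assigned, first, last
-- ===== SOURCE B (Python) =====
-- def find_first_and_last(normalized_splitted):
--     found = False
--     first = ''
--     last = ''
--     for t in normalized_splitted: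
--         if '.' not in t:
--             first = t
--             found = True
--             break
--     for t in reversed(normalized_splitted):
--         if '.' not in t:
--             last = t
--             break
--     return found, first, last
-- ===== Notes on version B (the rewrite author's own statement) =====
-- stated objective: simpler
-- what changed: Replaces the single stateful accumulate-all-the-way loop (flag + two running variables) with two independent break-on-first-hit scans: a forward scan for the first dotless token and a backward scan over reversed input for the last; defaults keep the all-dotted/empty case at (False, '', '').
import Mathlib
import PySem

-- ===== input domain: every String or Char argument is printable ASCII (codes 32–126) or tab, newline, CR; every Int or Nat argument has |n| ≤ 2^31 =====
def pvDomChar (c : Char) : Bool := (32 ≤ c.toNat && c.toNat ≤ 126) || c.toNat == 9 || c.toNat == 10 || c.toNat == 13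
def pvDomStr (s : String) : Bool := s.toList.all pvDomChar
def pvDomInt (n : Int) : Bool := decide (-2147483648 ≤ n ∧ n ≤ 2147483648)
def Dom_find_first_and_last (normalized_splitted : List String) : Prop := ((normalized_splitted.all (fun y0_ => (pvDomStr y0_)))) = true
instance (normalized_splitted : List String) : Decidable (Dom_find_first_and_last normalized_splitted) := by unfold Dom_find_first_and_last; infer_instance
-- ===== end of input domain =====

-- B replaces A's single stateful accumulate-to-the-end loop with two break-on-first-hit scans (forward for first, backward for last); objective: simpler.

-- ===== PORT A =====
-- for i in range(len(..)): folds over the list elements in order, threading (is_assigned, first, last)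
def find_first_and_last (normalized_splitted : List String) : Bool × String × String :=
  let r := normalized_splitted.foldl
    (fun (st : Bool × String × String) t =>
      if PySem.Str.find t "." == -1 then
        (true, if st.1 = false then t else st.2.1, t)
      else st)
    (false, "", "")
  r

-- ===== PORT B =====
-- forward loop with break = first element with '.' not in t
def pvFirstDotless : List String → Option String
  | [] => none
  | t :: rest => if PySem.Str.isIn "." t then pvFirstDotless rest else some t

def find_first_and_last_alt (normalized_splitted : List String) : Bool × String × String :=
  let (found, first) :=
    match pvFirstDotless normalized_splitted with
    | some t => (true, t)
    | none => (false, "")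
  let last :=
    match pvFirstDotless normalized_splitted.reverse with
    | some t => t
    | none => ""
  (found, first, last)

-- ===== PRECONDITION & SPEC =====
def Spec_find_first_and_last (normalized_splitted : List String) (out : Bool × String × String) : Prop := out = find_first_and_last_alt normalized_splitted
instance (normalized_splitted : List String) (out : Bool × String × String) : Decidable (Spec_find_first_and_last normalized_splitted out) := by unfold Spec_find_first_and_last; infer_instance

-- ===== CLAIM =====
def Claim_equal_find_first_and_last : Prop := ∀ (normalized_splitted : List String), Dom_find_first_and_last normalized_splitted → Spec_find_first_and_last normalized_splitted (find_first_and_last normalized_splitted)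

-- ===== LEMMAS AND PROOFS =====

theorem pv_dot_toList : ("." : String).toList = ['.'] := rfl

-- the two ports' dotless tests agree: t.find('.') == -1  ↔  '.' not in t
theorem pv_test_agree (t : String) :
    (PySem.Str.find t "." == -1) = !(PySem.Str.isIn "." t) := by
  simp only [PySem.Str.find_eq, PySem.Str.isIn_eq, pv_dot_toList]
  by_cases h : ['.'] <:+: t.toList
  · have h1 : PySem.Chars.find t.toList ['.'] ≠ -1 :=
      (PySem.Chars.find_ne_neg_one_iff _ _).mpr h
    have h2 : PySem.Chars.isIn ['.'] t.toList = true :=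
      (PySem.Chars.isIn_iff_infix _ _).mpr h
    simp [h1, h2]
  · have h1 : PySem.Chars.find t.toList ['.'] = -1 :=
      (PySem.Chars.find_eq_neg_one_iff _ _).mpr h
    have h2 : PySem.Chars.isIn ['.'] t.toList = false := by
      cases hx : PySem.Chars.isIn ['.'] t.toList
      · rfl
      · exact absurd ((PySem.Chars.isIn_iff_infix _ _).mp hx) h
    simp [h1, h2]

theorem pv_test_of_isIn (t : String) (h : PySem.Chars.isIn ['.'] t.toList = true) :
    (PySem.Str.find t "." == -1) = false := by
  rw [pv_test_agree]
  simp only [PySem.Str.isIn_eq, pv_dot_toList, h]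
  rfl

theorem pv_test_of_not_isIn (t : String) (h : PySem.Chars.isIn ['.'] t.toList = false) :
    (PySem.Str.find t "." == -1) = true := by
  rw [pv_test_agree]
  simp only [PySem.Str.isIn_eq, pv_dot_toList, h]
  rfl

theorem pvFirstDotless_cons_of_isIn (t : String) (rest : List String)
    (h : PySem.Chars.isIn ['.'] t.toList = true) :
    pvFirstDotless (t :: rest) = pvFirstDotless rest := by
  simp [pvFirstDotless, PySem.Str.isIn_eq, pv_dot_toList, h]

theorem pvFirstDotless_cons_of_not_isIn (t : String) (rest : List String)
    (h : PySem.Chars.isIn ['.'] t.toList = false) :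
    pvFirstDotless (t :: rest) = some t := by
  simp [pvFirstDotless, PySem.Str.isIn_eq, pv_dot_toList, h]

theorem pvFirstDotless_append (xs ys : List String) :
    pvFirstDotless (xs ++ ys) = (pvFirstDotless xs).or (pvFirstDotless ys) := by
  induction xs with
  | nil => simp [pvFirstDotless]
  | cons t rest ih =>
    simp only [List.cons_append, pvFirstDotless, ih]
    split_ifs <;> simp

theorem pvFirstDotless_eq_none_iff (xs : List String) :
    pvFirstDotless xs = none ↔ ∀ t ∈ xs, PySem.Chars.isIn ['.'] t.toList = true := by
  induction xs with
  | nil => simp [pvFirstDotless]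
  | cons t rest ih =>
    cases h : PySem.Chars.isIn ['.'] t.toList
    · rw [pvFirstDotless_cons_of_not_isIn t rest h]
      simp [h]
    · rw [pvFirstDotless_cons_of_isIn t rest h]
      simp [h, ih]

-- once the flag is true, A's fold keeps 'first' and updates 'last' to the last dotless element
theorem pv_fold_true (xs : List String) (f l : String) :
    xs.foldl
      (fun (st : Bool × String × String) t =>
        if PySem.Str.find t "." == -1 then
          (true, if st.1 = false then t else st.2.1, t)
        else st)
      (true, f, l)
    = (true, f, (pvFirstDotless xs.reverse).getD l) := by
  induction xs generalizing l with
  | nil => simp [pvFirstDotless]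
  | cons t rest ih =>
    cases h : PySem.Chars.isIn ['.'] t.toList
    · simp only [List.foldl_cons, pv_test_of_not_isIn t h, if_true, List.reverse_cons,
        pvFirstDotless_append, pvFirstDotless_cons_of_not_isIn t [] h]
      have hf : (if (true : Bool) = false then t else f) = f := by simp
      rw [hf, ih t]
      cases hx : pvFirstDotless rest.reverse <;> simp
    · simp only [List.foldl_cons, pv_test_of_isIn t h, Bool.false_eq_true, if_false,
        List.reverse_cons, pvFirstDotless_append, pvFirstDotless_cons_of_isIn t [] h]
      rw [ih l]
      cases hx : pvFirstDotless rest.reverse <;> simp [pvFirstDotless]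

-- A's fold from the initial all-empty state, characterised by the two scans
theorem pv_fold_false (xs : List String) :
    xs.foldl
      (fun (st : Bool × String × String) t =>
        if PySem.Str.find t "." == -1 then
          (true, if st.1 = false then t else st.2.1, t)
        else st)
      (false, "", "")
    = match pvFirstDotless xs with
      | some u => (true, u, (pvFirstDotless xs.reverse).getD "")
      | none => (false, "", "") := by
  induction xs with
  | nil => rfl
  | cons t rest ih =>
    cases h : PySem.Chars.isIn ['.'] t.toList
    · simp only [List.foldl_cons, pv_test_of_not_isIn t h, if_true,
        pvFirstDotless_cons_of_not_isIn t rest h, List.reverse_cons, pvFirstDotless_append,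
        pvFirstDotless_cons_of_not_isIn t [] h]
      rw [pv_fold_true]
      cases hx : pvFirstDotless rest.reverse <;> simp
    · simp only [List.foldl_cons, pv_test_of_isIn t h, Bool.false_eq_true, if_false,
        pvFirstDotless_cons_of_isIn t rest h, List.reverse_cons, pvFirstDotless_append,
        pvFirstDotless_cons_of_isIn t [] h]
      rw [ih]
      cases hx : pvFirstDotless rest <;> simp [pvFirstDotless]

theorem pv_main (xs : List String) :
    find_first_and_last xs = find_first_and_last_alt xs := by
  unfold find_first_and_last find_first_and_last_alt
  rw [pv_fold_false]
  cases hx : pvFirstDotless xs with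
  | none =>
    have hy : pvFirstDotless xs.reverse = none := by
      rw [pvFirstDotless_eq_none_iff] at hx ⊢
      intro t ht
      exact hx t (List.mem_reverse.mp ht)
    simp [hy]
  | some u =>
    cases hy : pvFirstDotless xs.reverse with
    | none =>
      exfalso
      have hall := (pvFirstDotless_eq_none_iff _).mp hy
      have hx' : pvFirstDotless xs = none := by
        rw [pvFirstDotless_eq_none_iff]
        intro t ht
        exact hall t (List.mem_reverse.mpr ht)
      rw [hx] at hx'
      simp at hx'
    | some v => simp

-- ===== VERDICT =====
theorem find_first_and_last_spec : Claim_equal_find_first_and_last := by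
  intro xs _
  unfold Spec_find_first_and_last
  exact pv_main xs
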